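-- pv_equiv track=rewrite | github.com/Nubiru/bhaskara | conversion_numerica.py | bin_to_base_direct
-- ===== SOURCE A (Python) =====
-- SYMBOLS = "0123456789ABCDEF"
--
-- def simbolo_valor(v: int) -> str:
--     if not (0 <= v < len(SYMBOLS)):
--         raise ValueError(f"Valor de dígito fuera de rango: {v}")
--     return SYMBOLS[v]
--
-- def separar_partes(num: str):
--     """Devuelve (parte_entera_str, parte_frac_str) sin signo ni prefijos."""
--     if "." in num:
--         a, b = num.split(".", 1)
--     else:
--         a, b = num, ""
--     return a, b
--
-- def agrupar_binario(bits: str, tam: int, izquierda=True) -> list[str]: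
--     """Agrupa una cadena de bits en bloques de tamaño tam,
--     padding con ceros a la izquierda (parte entera) o derecha (fracción)."""
--     if not bits:
--         return []
--     if izquierda:
--         # parte entera: rellenar a la izquierda
--         resto = len(bits) % tam
--         if resto:
--             bits = "0" * (tam - resto) + bits
--         return [bits[i:i+tam] for i in range(0, len(bits), tam)]
--     else:
--         # parte fracc: rellenar a la derecha
--         resto = len(bits) % tam
--         if resto:
--             bits = bits + "0" * (tam - resto)
--         return [bits[i:i+tam] for i in range(0, len(bits), tam)]
--
-- def bin_to_base_direct(num: str, base_dest: int) -> str: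
--     tam = 3 if base_dest == 8 else 4
--     ent, frac = separar_partes(num)
--     ent = ent or "0"
--     # Validación de binario
--     if any(ch not in "01" for ch in ent + frac):
--         raise ValueError("Número binario inválido para conversión directa.")
--     grupos_ent = agrupar_binario(ent, tam, izquierda=True)
--     grupos_frac = agrupar_binario(frac, tam, izquierda=False)
--     # convertir cada grupo
--     out_ent = "".join(simbolo_valor(int(g, 2)) for g in grupos_ent) or "0"
--     out_ent = out_ent.lstrip("0") or "0"
--     out_frac = "".join(simbolo_valor(int(g, 2)) for g in grupos_frac)
--     out = out_ent
--     if out_frac: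
--         # quitar ceros de la derecha
--         out_frac = out_frac.rstrip("0")
--         if out_frac:
--             out += "." + out_frac
--     return out
-- ===== SOURCE B (Python) =====
-- SYMBOLS = "0123456789ABCDEF"
--
-- def bin_to_base_direct(num: str, base_dest: int) -> str:
--     # Arithmetic re-implementation: integer part by repeated division,
--     # fractional part by exact rational multiply-and-extract.
--     tam = 3 if base_dest == 8 else 4
--     if "." in num:
--         ent, frac = num.split(".", 1)
--     else:
--         ent, frac = num, ""
--     ent = ent or "0"
--     if any(ch not in "01" for ch in ent + frac):
--         raise ValueError("Número binario inválido para conversión directa.")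
--     base = 1 << tam
--     n = int(ent, 2)
--     digits = []
--     while n:
--         digits.append(SYMBOLS[n % base])
--         n //= base
--     out = "".join(reversed(digits)) or "0"
--     if frac:
--         v = int(frac, 2)
--         denom = 1 << len(frac)
--         k = (len(frac) + tam - 1) // tam
--         fdigits = []
--         for _ in range(k):
--             v *= base
--             d, v = divmod(v, denom)
--             fdigits.append(SYMBOLS[d])
--         tail = "".join(fdigits).rstrip("0")
--         if tail:
--             out += "." + tail
--     return out
-- ===== Notes on version B (the rewrite author's own statement) =====
-- stated objective: alternative
-- what changed: B replaces A's string manipulation (pad bits, slice into groups, convert each group) by pure integer arithmetic: the integer part's digits come from repeated division of int(ent,2) by the base, and the fraction's digits from exact rational multiply-and-extract (v*=base; digit,v=divmod(v,denom)) over denom=2**len(frac).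
import Mathlib
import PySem

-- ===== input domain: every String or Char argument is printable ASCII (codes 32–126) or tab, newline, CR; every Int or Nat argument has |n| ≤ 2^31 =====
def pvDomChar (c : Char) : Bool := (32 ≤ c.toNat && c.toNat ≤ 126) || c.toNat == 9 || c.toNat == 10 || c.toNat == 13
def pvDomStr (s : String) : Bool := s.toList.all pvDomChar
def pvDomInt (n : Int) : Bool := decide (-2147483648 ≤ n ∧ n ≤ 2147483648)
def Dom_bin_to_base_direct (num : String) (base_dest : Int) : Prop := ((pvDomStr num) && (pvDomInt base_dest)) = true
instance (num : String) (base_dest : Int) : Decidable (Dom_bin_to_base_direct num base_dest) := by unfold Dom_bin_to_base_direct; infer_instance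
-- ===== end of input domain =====

-- B replaces A's bit-grouping string manipulation by integer arithmetic (repeated
-- division for the integer part, exact rational digit extraction for the fraction);
-- objective: alternative (a genuinely different algorithm of similar cost).


-- SYMBOLS = "0123456789ABCDEF"  (module constant, shared by both Pythons)
def pvSymbols : List Char := "0123456789ABCDEF".toList

-- int(g, 2) for a string of '0'/'1' digits (both Pythons call int(_, 2); exact on
-- binary-digit strings, which is all that is reachable past the validation raise)
def pvBitsVal (g : List Char) : Nat :=
  g.foldl (fun a c => 2 * a + (if c = '1' then 1 else 0)) 0

-- s.rstrip("0")  (exact: removes trailing '0' characters)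
def pvRstrip0 (l : List Char) : List Char :=
  (l.reverse.dropWhile (· == '0')).reverse

-- ===== PORT A =====
-- simbolo_valor: SYMBOLS[v] after the range check; on the raise path (v ∉ [0,16),
-- unreachable past A's validation) the port returns the junk char '?'
def simbolo_valor (v : Nat) : Char :=
  if v < 16 then pvSymbols.getD v '?' else '?'

-- separar_partes: num.split(".", 1) when '.' is present, else (num, "")
def separar_partes (num : String) : List Char × List Char :=
  let cs := num.toList
  if '.' ∈ cs then (cs.takeWhile (· != '.'), (cs.dropWhile (· != '.')).tail)
  else (cs, [])

-- the chunking comprehension [bits[i:i+tam] for i in range(0, len(bits), tam)] (tam ≥ 1 at every call)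
def pvChunks (tam : Nat) : List Char → List (List Char)
  | [] => []
  | b :: bs => (b :: bs).take tam :: pvChunks tam (bs.drop (tam - 1))
termination_by l => l.length
decreasing_by simp

-- agrupar_binario
def agrupar_binario (bits : List Char) (tam : Nat) (izquierda : Bool) : List (List Char) :=
  if bits = [] then []
  else if izquierda then
    let resto := bits.length % tam
    let bits' := if resto ≠ 0 then List.replicate (tam - resto) '0' ++ bits else bits
    pvChunks tam bits'
  else
    let resto := bits.length % tam
    let bits' := if resto ≠ 0 then bits ++ List.replicate (tam - resto) '0' else bits
    pvChunks tam bits'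

-- bin_to_base_direct (A); on the validation raise path (invalid binary, excluded by
-- Pre_) the port returns ""
def bin_to_base_direct (num : String) (base_dest : Int) : String :=
  let tam : Nat := if base_dest = 8 then 3 else 4
  let p := separar_partes num
  let ent := if p.1 = [] then ['0'] else p.1
  let frac := p.2
  if (ent ++ frac).any (fun c => !(c == '0' || c == '1')) then ""
  else
    let grupos_ent := agrupar_binario ent tam true
    let grupos_frac := agrupar_binario frac tam false
    let out_ent0 := grupos_ent.map (fun g => simbolo_valor (pvBitsVal g))
    let out_ent1 := if out_ent0 = [] then ['0'] else out_ent0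
    let out_ent2 := out_ent1.dropWhile (· == '0')
    let out_ent := if out_ent2 = [] then ['0'] else out_ent2
    let out_frac := grupos_frac.map (fun g => simbolo_valor (pvBitsVal g))
    if out_frac ≠ [] then
      let out_frac' := pvRstrip0 out_frac
      if out_frac' ≠ [] then String.ofList (out_ent ++ '.' :: out_frac')
      else String.ofList out_ent
    else String.ofList out_ent

-- ===== PORT B =====
-- SYMBOLS[d]; every call site has d < 16, the default never fires
def pvSymB (d : Nat) : Char := pvSymbols.getD d '?'

-- the while loop «while n: digits.append(SYMBOLS[n % base]); n //= base»
-- (least-significant digit first; the caller reverses).  The base ≤ 1 guard only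
-- makes the recursion total; base is 8 or 16 at every call.
def pvDigitsRev (base : Nat) (n : Nat) : List Char :=
  if _h : n = 0 ∨ base ≤ 1 then []
  else pvSymB (n % base) :: pvDigitsRev base (n / base)
termination_by n
decreasing_by exact Nat.div_lt_self (by omega) (by omega)

-- the for loop «for _ in range(k): v *= base; d, v = divmod(v, denom); fdigits.append(SYMBOLS[d])»
def pvFracLoop (base denom : Nat) : Nat → Nat → List Char
  | 0, _ => []
  | k + 1, v =>
    let v' := v * base
    pvSymB (v' / denom) :: pvFracLoop base denom k (v' % denom)

def bin_to_base_direct_alt (num : String) (base_dest : Int) : String :=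
  let tam : Nat := if base_dest = 8 then 3 else 4
  let cs := num.toList
  let p := if '.' ∈ cs then (cs.takeWhile (· != '.'), (cs.dropWhile (· != '.')).tail)
           else (cs, [])
  let ent := if p.1 = [] then ['0'] else p.1
  let frac := p.2
  if (ent ++ frac).any (fun c => !(c == '0' || c == '1')) then ""
  else
    let base := 2 ^ tam
    let n := pvBitsVal ent
    let ds := (pvDigitsRev base n).reverse
    let out := if ds = [] then ['0'] else ds
    if frac ≠ [] then
      let v := pvBitsVal frac
      let denom := 2 ^ frac.length
      let k := (frac.length + tam - 1) / tam
      let tail := pvRstrip0 (pvFracLoop base denom k v)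
      if tail ≠ [] then String.ofList (out ++ '.' :: tail)
      else String.ofList out
    else String.ofList out

-- ===== PRECONDITION & SPEC =====
-- Pre_ excludes exactly the inputs on which A raises ValueError: a character other
-- than '0'/'1'/'.' or a second '.' makes the validity check fire.
def Pre_bin_to_base_direct (num : String) (base_dest : Int) : Prop :=
  num.toList.all (fun c => c == '0' || c == '1' || c == '.') = true ∧ num.toList.count '.' ≤ 1
instance (num : String) (base_dest : Int) : Decidable (Pre_bin_to_base_direct num base_dest) := by
  unfold Pre_bin_to_base_direct; infer_instance

def pvWitness_bin_to_base_direct : String × Int := ("1.1", 8)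

def Spec_bin_to_base_direct (num : String) (base_dest : Int) (out : String) : Prop :=
  out = bin_to_base_direct_alt num base_dest
instance (num : String) (base_dest : Int) (out : String) : Decidable (Spec_bin_to_base_direct num base_dest out) := by
  unfold Spec_bin_to_base_direct; infer_instance

-- ===== CLAIM (what is proved, stated in full; the proofs are below) =====
def Claim_equal_bin_to_base_direct : Prop := ∀ (num : String) (base_dest : Int), Dom_bin_to_base_direct num base_dest → Pre_bin_to_base_direct num base_dest → Spec_bin_to_base_direct num base_dest (bin_to_base_direct num base_dest)

-- ===== LEMMAS AND PROOFS =====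

theorem pv_sym_eq (v : Nat) : simbolo_valor v = pvSymB v := by
  by_cases h : v < 16
  · simp [simbolo_valor, pvSymB, h]
  · simp only [simbolo_valor, pvSymB, if_neg h]
    exact (List.getD_eq_default _ _ (by simpa [pvSymbols] using Nat.le_of_not_lt h)).symm

theorem pv_bitsVal_foldl (xs : List Char) (a : Nat) :
    xs.foldl (fun a c => 2 * a + (if c = '1' then 1 else 0)) a
      = a * 2 ^ xs.length + pvBitsVal xs := by
  induction xs generalizing a with
  | nil => simp [pvBitsVal]
  | cons c cs ih =>
    simp only [List.foldl_cons, pvBitsVal, List.length_cons]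
    rw [ih, ih (2 * 0 + _)]
    ring

theorem pv_bitsVal_append (xs ys : List Char) :
    pvBitsVal (xs ++ ys) = pvBitsVal xs * 2 ^ ys.length + pvBitsVal ys := by
  simp only [pvBitsVal, List.foldl_append]
  rw [pv_bitsVal_foldl]
  rfl

theorem pv_bitsVal_lt (xs : List Char) (h : ∀ c ∈ xs, c = '0' ∨ c = '1') :
    pvBitsVal xs < 2 ^ xs.length := by
  induction xs with
  | nil => simp [pvBitsVal]
  | cons c cs ih =>
    have := pv_bitsVal_append [c] cs
    simp only [List.singleton_append] at this
    rw [this]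
    have hc := h c (by simp)
    have hcs := ih (fun c hc => h c (by simp [hc]))
    have hb : pvBitsVal [c] ≤ 1 := by
      rcases hc with h | h <;> simp [h, pvBitsVal]
    calc pvBitsVal [c] * 2 ^ cs.length + pvBitsVal cs
        ≤ 1 * 2 ^ cs.length + pvBitsVal cs := by
          exact Nat.add_le_add_right (Nat.mul_le_mul_right _ hb) _
      _ < 2 ^ (c :: cs).length := by simp [List.length_cons, pow_succ]; omega

theorem pv_bitsVal_zeros (xs : List Char) (h : ∀ c ∈ xs, c = '0') : pvBitsVal xs = 0 := by
  induction xs with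
  | nil => rfl
  | cons c cs ih =>
    have := pv_bitsVal_append [c] cs
    simp only [List.singleton_append] at this
    rw [this, ih (fun c hc => h c (by simp [hc]))]
    simp [pvBitsVal, h c (by simp)]

theorem pv_bitsVal_eq_zero (xs : List Char) (hb : ∀ c ∈ xs, c = '0' ∨ c = '1')
    (h : pvBitsVal xs = 0) : ∀ c ∈ xs, c = '0' := by
  induction xs with
  | nil => simp
  | cons c cs ih =>
    have he := pv_bitsVal_append [c] cs
    simp only [List.singleton_append] at he
    rw [he] at h
    have hp : 0 < 2 ^ cs.length := Nat.two_pow_pos _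
    have h2 : pvBitsVal cs = 0 := Nat.eq_zero_of_add_eq_zero_left h
    have h1 : pvBitsVal [c] * 2 ^ cs.length = 0 := Nat.eq_zero_of_add_eq_zero_right h
    have h1' : pvBitsVal [c] = 0 := by
      rcases Nat.mul_eq_zero.mp h1 with h' | h'
      · exact h'
      · omega
    intro d hd
    rcases List.mem_cons.mp hd with rfl | hd
    · rcases hb d (by simp) with h' | h'
      · exact h'
      · rw [h'] at h1'; simp [pvBitsVal] at h1'
    · exact ih (fun e he' => hb e (List.mem_cons_of_mem _ he')) h2 d hd

theorem pv_chunks_cons (tam : Nat) (ht : 1 ≤ tam) (l : List Char) (hl : l ≠ []) :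
    pvChunks tam l = l.take tam :: pvChunks tam (l.drop tam) := by
  match l with
  | [] => exact absurd rfl hl
  | b :: bs =>
    rw [pvChunks]
    congr 1
    congr 1
    obtain ⟨t, rfl⟩ := Nat.exists_eq_add_of_le ht
    simp [Nat.add_comm 1 t, List.drop_succ_cons]

theorem pv_chunks_flatten (tam : Nat) (ht : 1 ≤ tam) (l : List Char) :
    (pvChunks tam l).flatten = l := by
  induction hn : l.length using Nat.strong_induction_on generalizing l with
  | _ n ih =>
    match l with
    | [] => simp [pvChunks]
    | b :: bs =>
      rw [pv_chunks_cons tam ht _ (by simp)]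
      rw [List.flatten_cons]
      rw [ih ((b :: bs).drop tam).length (by simp at hn ⊢; omega) _ rfl]
      exact List.take_append_drop _ _

theorem pv_chunks_append (tam : Nat) (ht : 1 ≤ tam) :
    ∀ (k : Nat) (R S : List Char), R.length = k * tam →
      pvChunks tam (R ++ S) = pvChunks tam R ++ pvChunks tam S := by
  intro k
  induction k with
  | zero => intro R S hR; simp at hR; simp [hR, pvChunks]
  | succ k ih =>
    intro R S hR
    have hR1 : R ≠ [] := by intro h; subst h; simp at hR; omega
    have hRS : (R ++ S) ≠ [] := by simp [hR1]
    have hlen : tam ≤ R.length := by rw [hR]; calc tam = 1 * tam := (one_mul _).symm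
                                                 _ ≤ (k+1) * tam := Nat.mul_le_mul_right _ (by omega)
    rw [pv_chunks_cons tam ht _ hRS, pv_chunks_cons tam ht _ hR1]
    rw [List.take_append_of_le_length hlen, List.drop_append_of_le_length hlen]
    rw [ih (R.drop tam) S (by simp [hR]; ring_nf; omega)]
    simp

theorem pv_digitsRev_nil (base n : Nat) (hb : 1 < base) :
    pvDigitsRev base n = [] ↔ n = 0 := by
  constructor
  · intro h
    by_contra hn
    rw [pvDigitsRev] at h
    simp [hn, Nat.not_le.mpr hb] at h
  · intro h; subst h; rw [pvDigitsRev]; simp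

theorem pv_symB_zero_iff (v : Nat) : pvSymB v = '0' ↔ v = 0 := by
  by_cases hv : v < 16
  · interval_cases v <;> simp [pvSymB, pvSymbols]
  · have : pvSymB v = '?' := by
      unfold pvSymB
      exact List.getD_eq_default _ _ (by simpa [pvSymbols] using Nat.le_of_not_lt hv)
    rw [this]
    constructor
    · intro h; exact absurd h (by decide)
    · intro h; omega

theorem pv_int_part (tam : Nat) (ht : 1 ≤ tam) :
    ∀ (k : Nat) (R : List Char), R.length = k * tam → (∀ c ∈ R, c = '0' ∨ c = '1') →
      (pvDigitsRev (2 ^ tam) (pvBitsVal R)).reverse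
        = (List.map (fun g => pvSymB (pvBitsVal g)) (pvChunks tam R)).dropWhile (· == '0') := by
  have hB : 1 < 2 ^ tam := by
    calc 1 < 2 ^ 1 := by norm_num
    _ ≤ 2 ^ tam := Nat.pow_le_pow_right (by omega) ht
  intro k
  induction k with
  | zero =>
    intro R hR _
    simp at hR
    subst hR
    rw [pvDigitsRev, dif_pos (Or.inl (by rfl : pvBitsVal [] = 0))]
    simp [pvChunks]
  | succ k ih =>
    intro R hR hb
    -- split off the LAST chunk
    set S := R.take (k * tam) with hS
    set g := R.drop (k * tam) with hg
    have hmul : (k + 1) * tam = k * tam + tam := by ring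
    have hRsplit : R = S ++ g := (List.take_append_drop _ _).symm
    have hSlen : S.length = k * tam := by
      rw [hS, List.length_take]; omega
    have hglen : g.length = tam := by
      rw [hg, List.length_drop, hR]; omega
    have hSb : ∀ c ∈ S, c = '0' ∨ c = '1' := fun c hc => hb c (hRsplit ▸ List.mem_append_left _ hc)
    have hgb : ∀ c ∈ g, c = '0' ∨ c = '1' := fun c hc => hb c (hRsplit ▸ List.mem_append_right _ hc)
    have hval : pvBitsVal R = pvBitsVal S * 2 ^ tam + pvBitsVal g := by
      rw [hRsplit, pv_bitsVal_append, hglen]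
    have hglt : pvBitsVal g < 2 ^ tam := hglen ▸ pv_bitsVal_lt g hgb
    have hchunks : pvChunks tam R = pvChunks tam S ++ [g] := by
      rw [hRsplit, pv_chunks_append tam ht k S g hSlen]
      congr 1
      rw [pv_chunks_cons tam ht g (by intro h; rw [h] at hglen; simp at hglen; omega)]
      rw [List.take_of_length_le (by omega), List.drop_eq_nil_of_le (by omega)]
      simp [pvChunks]
    by_cases hn : pvBitsVal R = 0
    · -- everything zero
      have hz : ∀ c ∈ R, c = '0' := pv_bitsVal_eq_zero R hb hn
      rw [pvDigitsRev, dif_pos (Or.inl hn)]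
      simp only [List.reverse_nil]
      symm
      rw [List.dropWhile_eq_nil_iff]
      intro x hx
      rw [List.mem_map] at hx
      obtain ⟨g', hg', rfl⟩ := hx
      have hsub : ∀ c ∈ g', c = '0' := by
        intro c hc
        apply hz
        have hm := List.mem_flatten.mpr ⟨g', hg', hc⟩
        rwa [pv_chunks_flatten tam ht R] at hm
      rw [pv_bitsVal_zeros g' hsub]
      simp [pvSymB, pvSymbols]
    · rw [pvDigitsRev, dif_neg (by push Not; exact ⟨hn, by omega⟩)]
      have hmod : pvBitsVal R % 2 ^ tam = pvBitsVal g := by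
        rw [hval, Nat.add_comm, Nat.add_mul_mod_self_right, Nat.mod_eq_of_lt hglt]
      have hdiv : pvBitsVal R / 2 ^ tam = pvBitsVal S := by
        rw [hval, Nat.add_comm, Nat.add_mul_div_right _ _ (by omega), Nat.div_eq_of_lt hglt]
        omega
      rw [hmod, hdiv, List.reverse_cons]
      rw [ih S hSlen hSb]
      rw [hchunks, List.map_append, List.dropWhile_append]
      by_cases hemp : ((pvChunks tam S).map (fun g => pvSymB (pvBitsVal g))).dropWhile (· == '0') = []
      · -- S digits all stripped → val S = 0 → val g ≠ 0 → sym g ≠ '0'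
        have hS0 : pvBitsVal S = 0 := by
          by_contra hS0
          have hne := (pv_digitsRev_nil (2 ^ tam) (pvBitsVal S) hB).not.mpr hS0
          rw [← ih S hSlen hSb] at hemp
          simp at hemp
          exact hne hemp
        have hg0 : pvBitsVal g ≠ 0 := by
          intro h; apply hn; rw [hval, hS0, h]; simp
        have hns : ¬ (pvSymB (pvBitsVal g) == '0') = true := by
          simp only [beq_iff_eq]
          rw [pv_symB_zero_iff]
          exact hg0
        rw [if_pos (by simpa [List.isEmpty_iff] using hemp), hemp]
        simp [hns]
      · rw [if_neg (by simpa [List.isEmpty_iff] using hemp)]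
        simp

theorem pv_frac_part (tam L p : Nat) (ht : 1 ≤ tam) :
    ∀ (k : Nat) (R : List Char) (v m : Nat), (∀ c ∈ R, c = '0' ∨ c = '1') →
      R.length = k * tam → L + p = k * tam + m → v * 2 ^ p = pvBitsVal R * 2 ^ m →
      pvFracLoop (2 ^ tam) (2 ^ L) k v
        = List.map (fun g => pvSymB (pvBitsVal g)) (pvChunks tam R) := by
  intro k
  induction k with
  | zero =>
    intro R v m _ hR _ _
    simp at hR
    subst hR
    simp [pvFracLoop, pvChunks]
  | succ k ih =>
    intro R v m hb hR hLp hv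
    have hmul : (k + 1) * tam = k * tam + tam := by ring
    set g := R.take tam with hg
    set R' := R.drop tam with hR'
    have hRsplit : R = g ++ R' := (List.take_append_drop _ _).symm
    have hglen : g.length = tam := by rw [hg, List.length_take]; omega
    have hR'len : R'.length = k * tam := by rw [hR', List.length_drop]; omega
    have hgb : ∀ c ∈ g, c = '0' ∨ c = '1' := fun c hc => hb c (hRsplit ▸ List.mem_append_left _ hc)
    have hR'b : ∀ c ∈ R', c = '0' ∨ c = '1' := fun c hc => hb c (hRsplit ▸ List.mem_append_right _ hc)
    have hval : pvBitsVal R = pvBitsVal g * 2 ^ (k * tam) + pvBitsVal R' := by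
      rw [hRsplit, pv_bitsVal_append, hR'len]
    have hR'lt : pvBitsVal R' < 2 ^ (k * tam) := hR'len ▸ pv_bitsVal_lt R' hR'b
    have hRne : R ≠ [] := by intro h; rw [h] at hR; simp at hR; omega
    rw [pv_chunks_cons tam ht R hRne, ← hg, ← hR']
    rw [pvFracLoop]
    simp only [List.map_cons]
    have hpowL : (2:Nat) ^ L * 2 ^ p = 2 ^ (k * tam) * (2 ^ m * 2 ^ tam) := by
      rw [← pow_add, ← pow_add, ← pow_add, hLp]; ring_nf
    -- the emitted digit is the value of the first chunk
    have hdig : v * 2 ^ tam / 2 ^ L = pvBitsVal g := by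
      have h1 : v * 2 ^ tam / 2 ^ L = v * 2 ^ tam * 2 ^ p / (2 ^ L * 2 ^ p) :=
        (Nat.mul_div_mul_right _ _ (Nat.two_pow_pos p)).symm
      rw [h1]
      have h2 : v * 2 ^ tam * 2 ^ p = pvBitsVal R * (2 ^ m * 2 ^ tam) := by
        calc v * 2 ^ tam * 2 ^ p = (v * 2 ^ p) * 2 ^ tam := by ring
        _ = pvBitsVal R * 2 ^ m * 2 ^ tam := by rw [hv]
        _ = pvBitsVal R * (2 ^ m * 2 ^ tam) := by ring
      rw [h2, hpowL, Nat.mul_div_mul_right _ _ (by positivity)]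
      rw [hval, Nat.add_comm, Nat.add_mul_div_right _ _ (Nat.two_pow_pos _), Nat.div_eq_of_lt hR'lt]
      omega
    congr 1
    · rw [hdig]
    · -- invariant for the next iteration
      apply ih R' (v * 2 ^ tam % 2 ^ L) (m + tam) hR'b hR'len (by omega)
      have h1 : v * 2 ^ tam % 2 ^ L * 2 ^ p = v * 2 ^ tam * 2 ^ p % (2 ^ L * 2 ^ p) :=
        (Nat.mul_mod_mul_right _ _ _).symm
      have h2 : v * 2 ^ tam * 2 ^ p = pvBitsVal R * (2 ^ m * 2 ^ tam) := by
        calc v * 2 ^ tam * 2 ^ p = (v * 2 ^ p) * 2 ^ tam := by ring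
        _ = pvBitsVal R * 2 ^ m * 2 ^ tam := by rw [hv]
        _ = pvBitsVal R * (2 ^ m * 2 ^ tam) := by ring
      have h3 : pvBitsVal R % 2 ^ (k * tam) = pvBitsVal R' := by
        rw [hval, Nat.add_comm, Nat.add_mul_mod_self_right, Nat.mod_eq_of_lt hR'lt]
      rw [h1, h2, hpowL, Nat.mul_mod_mul_right, h3, pow_add]

-- A's symbol chain equals B's (the group maps coincide symbol by symbol)
theorem pv_map_sym (gs : List (List Char)) :
    gs.map (fun g => simbolo_valor (pvBitsVal g)) = gs.map (fun g => pvSymB (pvBitsVal g)) := by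
  simp [pv_sym_eq]

-- the integer-part digit lists of the two ports coincide
theorem pv_ent_eq (tam : Nat) (ht : 1 ≤ tam) (e : List Char) (he : e ≠ [])
    (hb : ∀ c ∈ e, c = '0' ∨ c = '1') :
    ((agrupar_binario e tam true).map (fun g => simbolo_valor (pvBitsVal g))).dropWhile (· == '0')
      = (pvDigitsRev (2 ^ tam) (pvBitsVal e)).reverse := by
  have htpos : 0 < tam := ht
  have hq := Nat.div_add_mod e.length tam
  have hrlt : e.length % tam < tam := Nat.mod_lt _ htpos
  simp only [agrupar_binario, if_neg he, reduceIte]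
  by_cases hr : e.length % tam = 0
  · simp only [hr, ne_eq, not_true_eq_false, reduceIte]
    have hk : e.length = (e.length / tam) * tam := by
      generalize hgen : tam * (e.length / tam) = t at hq
      rw [Nat.mul_comm, hgen]; omega
    rw [pv_map_sym, ← pv_int_part tam ht (e.length / tam) e hk hb]
  · rw [if_pos hr]
    set P := List.replicate (tam - e.length % tam) '0' ++ e with hP
    have hPb : ∀ c ∈ P, c = '0' ∨ c = '1' := by
      intro c hc
      rcases List.mem_append.mp hc with hc | hc
      · left; exact List.eq_of_mem_replicate hc
      · exact hb c hc
    have hPlen : P.length = (e.length / tam + 1) * tam := by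
      rw [hP, List.length_append, List.length_replicate]
      have hmm : (e.length / tam + 1) * tam = tam * (e.length / tam) + tam := by ring
      rw [hmm]
      generalize tam * (e.length / tam) = t at hq ⊢
      omega
    have hPval : pvBitsVal P = pvBitsVal e := by
      rw [hP, pv_bitsVal_append, pv_bitsVal_zeros _ (fun c hc => List.eq_of_mem_replicate hc)]
      simp
    rw [pv_map_sym, ← pv_int_part tam ht (e.length / tam + 1) P hPlen hPb, hPval]

-- the fraction-part digit lists of the two ports coincide
theorem pv_frac_eq (tam : Nat) (ht : 1 ≤ tam) (f : List Char) (hf : f ≠ [])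
    (hb : ∀ c ∈ f, c = '0' ∨ c = '1') :
    (agrupar_binario f tam false).map (fun g => simbolo_valor (pvBitsVal g))
      = pvFracLoop (2 ^ tam) (2 ^ f.length) ((f.length + tam - 1) / tam) (pvBitsVal f) := by
  have htpos : 0 < tam := ht
  have hq := Nat.div_add_mod f.length tam
  have hrlt : f.length % tam < tam := Nat.mod_lt _ htpos
  simp only [agrupar_binario, if_neg hf, Bool.false_eq_true, reduceIte]
  by_cases hr : f.length % tam = 0
  · simp only [hr, ne_eq, not_true_eq_false, reduceIte]
    have hk : f.length = (f.length / tam) * tam := by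
      generalize hgen : tam * (f.length / tam) = t at hq
      rw [Nat.mul_comm, hgen]; omega
    have hceil : (f.length + tam - 1) / tam = f.length / tam := by
      have h1 : f.length + tam - 1 = tam * (f.length / tam) + (tam - 1) := by
        generalize tam * (f.length / tam) = t at hq ⊢; omega
      have h2 : (tam - 1) / tam = 0 := Nat.div_eq_of_lt (by omega)
      rw [h1, Nat.mul_add_div htpos, h2]
      omega
    rw [hceil, pv_map_sym]
    exact (pv_frac_part tam f.length 0 ht (f.length / tam) f (pvBitsVal f) 0 hb hk
      (by generalize tam * (f.length / tam) = t at hq ⊢; omega) rfl).symm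
  · rw [if_pos hr]
    set P := f ++ List.replicate (tam - f.length % tam) '0' with hP
    have hPb : ∀ c ∈ P, c = '0' ∨ c = '1' := by
      intro c hc
      rcases List.mem_append.mp hc with hc | hc
      · exact hb c hc
      · left; exact List.eq_of_mem_replicate hc
    have hPlen : P.length = (f.length / tam + 1) * tam := by
      rw [hP, List.length_append, List.length_replicate]
      have hmm : (f.length / tam + 1) * tam = tam * (f.length / tam) + tam := by ring
      rw [hmm]
      generalize tam * (f.length / tam) = t at hq ⊢
      omega
    have hceil : (f.length + tam - 1) / tam = f.length / tam + 1 := by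
      have h1 : f.length + tam - 1 = tam * (f.length / tam) + (f.length % tam + tam - 1) := by
        generalize tam * (f.length / tam) = t at hq ⊢; omega
      have h2 : (f.length % tam + tam - 1) / tam = 1 :=
        Nat.div_eq_of_lt_le (by omega) (by omega)
      rw [h1, Nat.mul_add_div htpos, h2]
    have hval : pvBitsVal f * 2 ^ (tam - f.length % tam) = pvBitsVal P * 2 ^ 0 := by
      rw [hP, pv_bitsVal_append, pv_bitsVal_zeros _ (fun c hc => List.eq_of_mem_replicate hc)]
      simp
    have hLp : f.length + (tam - f.length % tam) = (f.length / tam + 1) * tam + 0 := by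
      have hmm : (f.length / tam + 1) * tam = tam * (f.length / tam) + tam := by ring
      rw [hmm]
      generalize tam * (f.length / tam) = t at hq ⊢
      omega
    rw [hceil, pv_map_sym]
    exact (pv_frac_part tam f.length (tam - f.length % tam) ht (f.length / tam + 1) P
      (pvBitsVal f) 0 hPb hPlen hLp hval).symm

-- under Pre_, the fraction piece contains no '.'
theorem pv_frac_no_dot (cs : List Char) (h : cs.count '.' ≤ 1) :
    '.' ∉ (cs.dropWhile (· != '.')).tail := by
  induction cs with
  | nil => simp
  | cons c cs ih =>
    by_cases hc : c = '.'
    · subst hc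
      rw [List.dropWhile_cons_of_neg (by simp)]
      simp only [List.tail_cons]
      rw [List.count_cons] at h; simp at h
      exact List.count_eq_zero.mp (by omega)
    · rw [List.dropWhile_cons_of_pos (by simp [hc])]
      exact ih (by rw [List.count_cons] at h; omega)

-- the grouping of a nonempty bit string is nonempty
theorem pv_agrupar_ne_nil (bits : List Char) (tam : Nat) (iz : Bool) (ht : 1 ≤ tam)
    (hb : bits ≠ []) : agrupar_binario bits tam iz ≠ [] := by
  unfold agrupar_binario
  rw [if_neg hb]
  have key : ∀ l : List Char, l ≠ [] → pvChunks tam l ≠ [] := by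
    intro l hl
    rw [pv_chunks_cons tam ht l hl]
    simp
  split
  · apply key
    split
    · simp [hb]
    · exact hb
  · apply key
    split
    · simp [hb]
    · exact hb

-- agrupar of the empty list is empty
theorem pv_agrupar_nil (tam : Nat) (iz : Bool) : agrupar_binario [] tam iz = [] := by
  unfold agrupar_binario
  simp

-- ===== VERDICT (by name: the statement is the Claim_ definition above) =====
theorem bin_to_base_direct_spec : Claim_equal_bin_to_base_direct := by
  intro num base_dest _hdom hpre
  obtain ⟨hallb, hcnt⟩ := hpre
  have hall : ∀ c ∈ num.toList, c = '0' ∨ c = '1' ∨ c = '.' := by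
    intro c hc
    have h := List.all_eq_true.mp hallb c hc
    simp at h
    tauto
  unfold Spec_bin_to_base_direct
  unfold bin_to_base_direct bin_to_base_direct_alt separar_partes
  simp only []
  set tam := (if base_dest = 8 then (3:Nat) else 4) with htam
  have ht : (1:Nat) ≤ tam := by rw [htam]; split <;> omega
  set cs := num.toList with hcs
  set p := (if '.' ∈ cs then (cs.takeWhile (· != '.'), (cs.dropWhile (· != '.')).tail)
            else (cs, [])) with hp
  set e := (if p.1 = [] then ['0'] else p.1) with he
  set f := p.2 with hf
  -- the pieces are valid binary strings
  have hp1 : ∀ c ∈ p.1, c = '0' ∨ c = '1' := by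
    intro c hc
    rw [hp] at hc
    by_cases hdot : '.' ∈ cs
    · rw [if_pos hdot] at hc
      simp only at hc
      have hne : c ≠ '.' := by simpa using List.mem_takeWhile_imp hc
      have hmem : c ∈ cs := (List.takeWhile_sublist _).subset hc
      rcases hall c hmem with h | h | h
      · exact Or.inl h
      · exact Or.inr h
      · exact absurd h hne
    · rw [if_neg hdot] at hc
      simp only at hc
      rcases hall c hc with h | h | h
      · exact Or.inl h
      · exact Or.inr h
      · rw [h] at hc; exact absurd hc hdot
  have heb : ∀ c ∈ e, c = '0' ∨ c = '1' := by
    rw [he]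
    split
    · intro c hc; simp at hc; exact Or.inl hc
    · exact hp1
  have hfb : ∀ c ∈ f, c = '0' ∨ c = '1' := by
    intro c hc
    rw [hf, hp] at hc
    by_cases hdot : '.' ∈ cs
    · rw [if_pos hdot] at hc
      simp only at hc
      have hne : c ≠ '.' := by
        intro h; rw [h] at hc; exact pv_frac_no_dot cs hcnt hc
      have hmem : c ∈ cs := ((List.tail_sublist _).trans (List.dropWhile_sublist _)).subset hc
      rcases hall c hmem with h | h | h
      · exact Or.inl h
      · exact Or.inr h
      · exact absurd h hne
    · rw [if_neg hdot] at hc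
      simp at hc
  have hene : e ≠ [] := by
    rw [he]; split <;> simp_all
  -- the validation check passes
  have hvalid : (e ++ f).any (fun c => !(c == '0' || c == '1')) = false := by
    rw [List.any_eq_false]
    intro c hc
    rcases List.mem_append.mp hc with hc | hc
    · rcases heb c hc with h | h <;> simp [h]
    · rcases hfb c hc with h | h <;> simp [h]
  have hvc : ¬ (((e ++ f).any fun c => !(c == '0' || c == '1')) = true) := by
    rw [hvalid]; simp
  rw [if_neg hvc]
  rw [if_neg hvc]
  -- the integer parts agree
  have hent := pv_ent_eq tam ht e hene heb
  have hout : (let l2 := ((if (agrupar_binario e tam true).map (fun g => simbolo_valor (pvBitsVal g)) = []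
                  then ['0'] else (agrupar_binario e tam true).map (fun g => simbolo_valor (pvBitsVal g))).dropWhile (· == '0'));
               if l2 = [] then ['0'] else l2)
      = (let ds := (pvDigitsRev (2 ^ tam) (pvBitsVal e)).reverse; if ds = [] then ['0'] else ds) := by
    have hne := pv_agrupar_ne_nil e tam true ht hene
    have hmapne : (agrupar_binario e tam true).map (fun g => simbolo_valor (pvBitsVal g)) ≠ [] := by
      simpa using hne
    simp only [if_neg hmapne, hent]
  simp only [] at hout
  rw [hout]
  by_cases hfe : f = []
  · rw [hfe, pv_agrupar_nil]
    simp
  · have hgne := pv_agrupar_ne_nil f tam false ht hfe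
    have hmapne : (agrupar_binario f tam false).map (fun g => simbolo_valor (pvBitsVal g)) ≠ [] := by
      simpa using hgne
    rw [if_pos hmapne, if_pos hfe, pv_frac_eq tam ht f hfe hfb]
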